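-- pv_equiv track=rewrite | github.com/gravitypriest/exercises | adding-calc/__main__.py | _flip_sign
-- ===== SOURCE A (Python) =====
-- NEG_ONE = ''.find('a')
--
-- def _flip_sign(a):
--     b = 0
--     while b + a != 0:
--         if a < 0:
--             b += 1
--         else:
--             b += NEG_ONE
--     return b
-- ===== SOURCE B (Python) =====
-- def _flip_sign(a):
--     return -a
-- ===== Notes on version B (the rewrite author's own statement) =====
-- stated objective: faster
-- what changed: Replaces the counting while-loop (incrementing/decrementing b until b + a == 0) with the closed form -a.
import Mathlib
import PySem

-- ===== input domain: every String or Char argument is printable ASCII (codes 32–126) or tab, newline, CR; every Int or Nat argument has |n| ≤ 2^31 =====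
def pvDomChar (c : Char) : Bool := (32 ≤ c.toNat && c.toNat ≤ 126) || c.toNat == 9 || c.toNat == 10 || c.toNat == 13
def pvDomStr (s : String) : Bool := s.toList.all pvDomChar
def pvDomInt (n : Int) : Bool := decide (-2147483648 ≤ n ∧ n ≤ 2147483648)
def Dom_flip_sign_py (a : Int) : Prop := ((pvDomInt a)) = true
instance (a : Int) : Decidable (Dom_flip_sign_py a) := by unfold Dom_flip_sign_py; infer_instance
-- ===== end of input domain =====

-- B replaces A's counting while-loop with the closed form -a (O(|a|) → O(1)).

-- ===== PORT A =====
-- NEG_ONE = ''.find('a')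
def NEG_ONE : Int := PySem.Str.find "" "a"

-- while b + a != 0: step b — run with fuel a.natAbs, which suffices (proved below)
def flipLoopA (a : Int) : Nat → Int → Int
  | 0, b => b
  | n + 1, b =>
    if b + a ≠ 0 then
      if a < 0 then flipLoopA a n (b + 1) else flipLoopA a n (b + NEG_ONE)
    else b

def flip_sign_py (a : Int) : Int := flipLoopA a a.natAbs 0

-- ===== PORT B =====
def flip_sign_py_alt (a : Int) : Int := -a

-- ===== PRECONDITION & SPEC =====
def Spec_flip_sign_py (a : Int) (out : Int) : Prop := out = flip_sign_py_alt a
instance (a : Int) (out : Int) : Decidable (Spec_flip_sign_py a out) := by unfold Spec_flip_sign_py; infer_instance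

-- ===== CLAIM (what is proved, stated in full; the proofs are below) =====
def Claim_equal_flip_sign_py : Prop := ∀ (a : Int), Dom_flip_sign_py a → Spec_flip_sign_py a (flip_sign_py a)

-- ===== LEMMAS AND PROOFS =====

theorem NEG_ONE_eq : NEG_ONE = -1 := by decide

theorem flipLoopA_eq (a : Int) :
    ∀ (n : Nat) (b : Int), (b + a).natAbs = n →
      (a < 0 → b + a ≤ 0) → (0 ≤ a → 0 ≤ b + a) → flipLoopA a n b = -a := by
  intro n
  induction n with
  | zero =>
    intro b hn _ _
    have : b + a = 0 := by omega
    simp [flipLoopA]; omega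
  | succ n ih =>
    intro b hn hneg hpos
    have hne : b + a ≠ 0 := by omega
    by_cases hlt : a < 0
    · have := hneg hlt
      simp [flipLoopA, hne, hlt]
      exact ih (b + 1) (by omega) (by omega) (by omega)
    · have := hpos (by omega)
      simp [flipLoopA, hne, hlt, NEG_ONE_eq]
      exact ih (b + -1) (by omega) (by omega) (by omega)

-- ===== VERDICT (by name: the statement is the Claim_ definition above) =====
theorem flip_sign_py_spec : Claim_equal_flip_sign_py := by
  intro a _
  unfold Spec_flip_sign_py flip_sign_py flip_sign_py_alt
  exact flipLoopA_eq a a.natAbs 0 (by omega) (by omega) (by omega)
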